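-- pv_equiv track=rewrite | github.com/EdOoO21/codes-python | ege/16 задания/final 16.py | f
-- ===== SOURCE A (Python) =====
-- def f(x):
--     if x <= 1:
--         return 1
--     if x % 4 == 0:
--         return f(x//2) + f(x//4) + (x//4)
--     if x % 2 == 0 and x % 4 != 0:
--         return f(x // 2) + (x // 2)
--     else:
--         return f(x - 1) + f(x - 4)
-- ===== SOURCE B (Python) =====
-- def f(x):
--     # Top-down memoization: each subproblem is solved once; the odd chain
--     # f(v) = f(v-1) + f(v-4) is unrolled into a loop over even predecessors.
--     memo = {}
--     def solve(v):
--         if v <= 1: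
--             return 1
--         if v in memo:
--             return memo[v]
--         if v % 4 == 0:
--             r = solve(v // 2) + solve(v // 4) + v // 4
--         elif v % 2 == 0:
--             r = solve(v // 2) + v // 2
--         else:
--             r = 1
--             for y in range(v - 1, 1, -4):
--                 r += solve(y)
--         memo[v] = r
--         return r
--     return solve(x)
-- ===== Notes on version B (the rewrite author's own statement) =====
-- stated objective: faster
-- what changed: Replaces A's plain overlapping recursion with top-down memoization (each subproblem solved once) and unrolls the odd-case double recursion f(v-1)+f(v-4) into an iterative loop over the even predecessors.
import Mathlib
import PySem

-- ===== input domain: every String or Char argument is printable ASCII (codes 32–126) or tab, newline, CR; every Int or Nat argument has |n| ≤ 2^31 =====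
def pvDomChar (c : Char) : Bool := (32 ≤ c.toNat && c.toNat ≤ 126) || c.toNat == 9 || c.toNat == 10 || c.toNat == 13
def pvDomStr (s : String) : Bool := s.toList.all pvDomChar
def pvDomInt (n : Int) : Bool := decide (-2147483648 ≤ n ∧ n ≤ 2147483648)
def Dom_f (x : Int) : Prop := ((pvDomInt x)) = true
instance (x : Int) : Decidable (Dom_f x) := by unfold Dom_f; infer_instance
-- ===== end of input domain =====

-- B replaces A's plain overlapping recursion by top-down memoization, with the odd-case
-- double recursion f(v-1)+f(v-4) unrolled into a loop over the even predecessors.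

-- ===== PORT A =====
def f (x : Int) : Int :=
  if _h : x ≤ 1 then 1
  else if PySem.Int.mod x 4 = 0 then
    f (PySem.Int.floordiv x 2) + f (PySem.Int.floordiv x 4) + PySem.Int.floordiv x 4
  else if PySem.Int.mod x 2 = 0 ∧ PySem.Int.mod x 4 ≠ 0 then
    f (PySem.Int.floordiv x 2) + PySem.Int.floordiv x 2
  else
    f (x - 1) + f (x - 4)
termination_by x.toNat
decreasing_by
  all_goals first
    | (simp only [PySem.Int.floordiv_eq_ediv_of_pos (by omega : (0:Int) < 2),
                  PySem.Int.floordiv_eq_ediv_of_pos (by omega : (0:Int) < 4)]; omega)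
    | omega

-- ===== PORT B =====
-- solveB with a fuel guard (structural recursion; fuel only makes the same computation
-- total, x.toNat + 1 is always enough): memoized f, returning value and updated memo.
def solveB : Nat → Int → PySem.Dict Int Int → Int × PySem.Dict Int Int
  | 0, _, memo => (1, memo)
  | fuel + 1, v, memo =>
    if v ≤ 1 then (1, memo)
    else
      match memo.get? v with
      | some r => (r, memo)
      | none =>
        let p :=
          if PySem.Int.mod v 4 = 0 then
            let p1 := solveB fuel (PySem.Int.floordiv v 2) memo
            let p2 := solveB fuel (PySem.Int.floordiv v 4) p1.2
            (p1.1 + p2.1 + PySem.Int.floordiv v 4, p2.2)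
          else if PySem.Int.mod v 2 = 0 then
            let p1 := solveB fuel (PySem.Int.floordiv v 2) memo
            (p1.1 + PySem.Int.floordiv v 2, p1.2)
          else
            -- for y in range(v-1, 1, -4): r += solve(y)
            (PySem.List.pyRange (v - 1) 1 (-4)).foldl
              (fun acc y => (acc.1 + (solveB fuel y acc.2).1, (solveB fuel y acc.2).2))
              (1, memo)
        (p.1, p.2.insert v p.1)

def f_alt (x : Int) : Int := (solveB (x.toNat + 1) x PySem.Dict.empty).1

-- ===== PRECONDITION & SPEC =====
def Spec_f (x : Int) (out : Int) : Prop := out = f_alt x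
instance (x : Int) (out : Int) : Decidable (Spec_f x out) := by unfold Spec_f; infer_instance

-- ===== CLAIM (what is proved, stated in full; the proofs are below) =====
def Claim_equal_f : Prop := ∀ (x : Int), Dom_f x → Spec_f x (f x)

-- ===== LEMMAS AND PROOFS =====

theorem f_base {x : Int} (h : x ≤ 1) : f x = 1 := by
  unfold f; simp [h]

theorem f_eq {x : Int} (h : ¬ x ≤ 1) :
    f x = if PySem.Int.mod x 4 = 0 then
            f (PySem.Int.floordiv x 2) + f (PySem.Int.floordiv x 4) + PySem.Int.floordiv x 4
          else if PySem.Int.mod x 2 = 0 ∧ PySem.Int.mod x 4 ≠ 0 then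
            f (PySem.Int.floordiv x 2) + PySem.Int.floordiv x 2
          else f (x - 1) + f (x - 4) := by
  conv_lhs => unfold f
  simp [h]

-- chain y = f y + f (y-4) + … while ≥ 2 (the value accumulated by the odd-case loop)
def chainF (y : Int) : Int :=
  if _h : 2 ≤ y then f y + chainF (y - 4) else 0
termination_by y.toNat
decreasing_by omega

-- unrolling A's odd branch: for odd v > 1, f v = 1 + chainF (v - 1)
theorem f_odd_unroll (v : Int) (hv : ¬ v ≤ 1) (h2 : PySem.Int.mod v 2 ≠ 0) (h4 : PySem.Int.mod v 4 ≠ 0) :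
    f v = 1 + chainF (v - 1) := by
  have hv3 : 3 ≤ v := by
    rw [PySem.Int.mod_eq_emod_of_pos (by omega)] at h2; omega
  rw [f_eq hv, if_neg h4, if_neg (by tauto), chainF, dif_pos (by omega : (2:Int) ≤ v - 1),
     show v - 1 - 4 = v - 5 by ring]
  by_cases hle : v - 4 ≤ 1
  · rw [f_base hle, chainF, dif_neg (by omega)]
    ring
  · have h2' : PySem.Int.mod (v - 4) 2 ≠ 0 := by
      rw [PySem.Int.mod_eq_emod_of_pos (by omega)] at h2 ⊢; omega
    have h4' : PySem.Int.mod (v - 4) 4 ≠ 0 := by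
      rw [PySem.Int.mod_eq_emod_of_pos (by omega)] at h4 ⊢; omega
    have ih := f_odd_unroll (v - 4) hle h2' h4'
    rw [show v - 4 - 1 = v - 5 by ring] at ih
    rw [ih]
    ring
termination_by v.toNat
decreasing_by omega

-- the countdown range of the odd-case loop, unfolded one step at a time
theorem pyRangeNeg4_nil (a : Int) (h : a ≤ 1) : PySem.List.pyRange a 1 (-4) = [] := by
  simp [PySem.List.pyRange]
  omega

theorem pyRangeNeg4_cons (a : Int) (h : 1 < a) :
    PySem.List.pyRange a 1 (-4) = a :: PySem.List.pyRange (a - 4) 1 (-4) := by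
  simp [PySem.List.pyRange]
  rw [if_pos h]
  by_cases h5 : 1 < a - 4
  · rw [if_pos h5]
    rw [show ((a - 1 + 4 - 1)/4).toNat = ((a - 4 - 1 + 4 - 1)/4).toNat + 1 by omega,
        List.range_succ_eq_map]
    simp [List.map_map, Function.comp_def]
    intro k _
    ring
  · rw [if_neg h5]
    rw [show ((a - 1 + 4 - 1)/4).toNat = 1 by omega]
    simp

def CohB (m : PySem.Dict Int Int) : Prop := ∀ k r, m.get? k = some r → r = f k

theorem cohB_empty : CohB PySem.Dict.empty := by
  intro k r h
  simp [PySem.Dict.empty, PySem.Dict.get?] at h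

theorem solveB_spec (fuel : Nat) : ∀ (v : Int) (memo : PySem.Dict Int Int),
    v.toNat < fuel → CohB memo →
    (solveB fuel v memo).1 = f v ∧ CohB (solveB fuel v memo).2 := by
  induction fuel with
  | zero => intro v memo h; exact absurd h (Nat.not_lt_zero _)
  | succ fl ih =>
    intro v memo hv hc
    rw [solveB]
    by_cases hb : v ≤ 1
    · rw [if_pos hb, f_base hb]
      exact ⟨rfl, hc⟩
    · rw [if_neg hb]
      cases hmv : memo.get? v with
      | some r =>
        simp only
        exact ⟨hc v r hmv, hc⟩
      | none =>
        simp only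
        have key : ∀ p : Int × PySem.Dict Int Int, p.1 = f v → CohB p.2 →
            (p.1, p.2.insert v p.1).1 = f v ∧ CohB (p.1, p.2.insert v p.1).2 := by
          intro p h1 h2c
          refine ⟨h1, fun k r' hk => ?_⟩
          rw [PySem.Dict.get?_insert] at hk
          by_cases hkv : k = v
          · rw [if_pos hkv] at hk
            cases hk
            rw [hkv, ← h1]
          · rw [if_neg hkv] at hk
            exact h2c k r' hk
        have hv2 : (2:Int) ≤ v := by omega
        have hfl : v.toNat ≤ fl := by omega
        have hdiv2 : (PySem.Int.floordiv v 2).toNat < fl := by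
          rw [PySem.Int.floordiv_eq_ediv_of_pos (by omega : (0:Int) < 2)]; omega
        have hdiv4 : (PySem.Int.floordiv v 4).toNat < fl := by
          rw [PySem.Int.floordiv_eq_ediv_of_pos (by omega : (0:Int) < 4)]; omega
        -- the odd-case loop: foldl over range(v-1, 1, -4) accumulates chainF
        have loop : ∀ (n : Nat) (a : Int), a.toNat ≤ n → a.toNat < fl →
            ∀ (r : Int) (m : PySem.Dict Int Int), CohB m →
            (((PySem.List.pyRange a 1 (-4)).foldl
                (fun acc y => (acc.1 + (solveB fl y acc.2).1, (solveB fl y acc.2).2))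
                (r, m)).1 = r + chainF a)
            ∧ CohB ((PySem.List.pyRange a 1 (-4)).foldl
                (fun acc y => (acc.1 + (solveB fl y acc.2).1, (solveB fl y acc.2).2))
                (r, m)).2 := by
          intro n
          induction n with
          | zero =>
            intro a ha _ r m hcm
            rw [pyRangeNeg4_nil a (by omega), List.foldl_nil, chainF, dif_neg (by omega)]
            exact ⟨by ring, hcm⟩
          | succ k ihn =>
            intro a ha hafl r m hcm
            by_cases h2 : 1 < a
            · rw [pyRangeNeg4_cons a h2, List.foldl_cons]
              have hs := ih a m hafl hcm
              have hrec := ihn (a - 4) (by omega) (by omega)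
                (r + (solveB fl a m).1) (solveB fl a m).2 hs.2
              refine ⟨?_, hrec.2⟩
              rw [hrec.1, hs.1]
              conv_rhs => rw [chainF]
              rw [dif_pos (by omega : (2:Int) ≤ a)]
              ring
            · rw [pyRangeNeg4_nil a (by omega), List.foldl_nil, chainF, dif_neg (by omega)]
              exact ⟨by ring, hcm⟩
        refine key _ ?_ ?_
        · -- value of the selected branch
          by_cases hm4 : PySem.Int.mod v 4 = 0
          · rw [if_pos hm4, f_eq hb, if_pos hm4]
            have s1 := ih (PySem.Int.floordiv v 2) memo hdiv2 hc
            have s2 := ih (PySem.Int.floordiv v 4) (solveB fl (PySem.Int.floordiv v 2) memo).2 hdiv4 s1.2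
            simp only [s1.1, s2.1]
          · rw [if_neg hm4]
            by_cases hm2 : PySem.Int.mod v 2 = 0
            · rw [if_pos hm2, f_eq hb, if_neg hm4,
                  if_pos (⟨hm2, hm4⟩ : PySem.Int.mod v 2 = 0 ∧ PySem.Int.mod v 4 ≠ 0)]
              have s1 := ih (PySem.Int.floordiv v 2) memo hdiv2 hc
              simp only [s1.1]
            · rw [if_neg hm2, f_odd_unroll v hb hm2 hm4]
              exact (loop (v - 1).toNat (v - 1) le_rfl (by omega) 1 memo hc).1
        · -- coherence of the memo after the branch
          by_cases hm4 : PySem.Int.mod v 4 = 0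
          · rw [if_pos hm4]
            exact (ih (PySem.Int.floordiv v 4) (solveB fl (PySem.Int.floordiv v 2) memo).2 hdiv4
              (ih (PySem.Int.floordiv v 2) memo hdiv2 hc).2).2
          · rw [if_neg hm4]
            by_cases hm2 : PySem.Int.mod v 2 = 0
            · rw [if_pos hm2]
              exact (ih (PySem.Int.floordiv v 2) memo hdiv2 hc).2
            · rw [if_neg hm2]
              exact (loop (v - 1).toNat (v - 1) le_rfl (by omega) 1 memo hc).2

theorem f_spec : Claim_equal_f := by
  intro x _
  show f x = f_alt x
  unfold f_alt
  exact ((solveB_spec (x.toNat + 1) x PySem.Dict.empty (by omega) cohB_empty).1).symm
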